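-- pv_equiv track=rewrite | github.com/azario0/Python-practice | largestprodgrid.py | largest_product_in_grid
-- ===== SOURCE A (Python) =====
-- def largest_product_in_grid(grid, size):
--     max_product = 0
--     for i in range(size):
--         for j in range(size):
--             if i < size - 3:
--                 # Check vertical products
--                 product = grid[i][j] * grid[i+1][j] * grid[i+2][j] * grid[i+3][j]
--                 if product > max_product:
--                     max_product = product
--             if j < size - 3:
--                 # Check horizontal products
--                 product = grid[i][j] * grid[i][j+1] * grid[i][j+2] * grid[i][j+3]
--                 if product > max_product:
--                     max_product = product
--                 # Check diagonal products (top-left to bottom-right)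
--                 if i < size - 3:
--                     product = grid[i][j] * grid[i+1][j+1] * grid[i+2][j+2] * grid[i+3][j+3]
--                     if product > max_product:
--                         max_product = product
--                 # Check diagonal products (bottom-left to top-right)
--                 if i >= 3:
--                     product = grid[i][j] * grid[i-1][j+1] * grid[i-2][j+2] * grid[i-3][j+3]
--                     if product > max_product:
--                         max_product = product
--     return max_product
-- ===== SOURCE B (Python) =====
-- def largest_product_in_grid(grid, size):
--     if size < 4:
--         return 0
--     lines = []
--     for i in range(size):
--         lines.append([grid[i][j] for j in range(size)])
--     for j in range(size):
--         lines.append([grid[i][j] for i in range(size)])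
--     for s in range(2 * size - 1):
--         d = s - (size - 1)
--         lines.append([grid[i][i - d] for i in range(max(0, d), min(size, size + d))])
--     for s in range(2 * size - 1):
--         lines.append([grid[i][s - i] for i in range(max(0, s - size + 1), min(size, s + 1))])
--     best = 0
--     for line in lines:
--         for t in range(len(line) - 3):
--             p = line[t] * line[t + 1] * line[t + 2] * line[t + 3]
--             if p > best:
--                 best = p
--     return best
-- ===== Notes on version B (the rewrite author's own statement) =====
-- stated objective: alternative
-- what changed: B extracts every row, column, diagonal and anti-diagonal of the square as a 1-D line and takes the best 4-window product by a sliding scan over each line, instead of A's per-cell scan with four guarded direction branches.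
import Mathlib
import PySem

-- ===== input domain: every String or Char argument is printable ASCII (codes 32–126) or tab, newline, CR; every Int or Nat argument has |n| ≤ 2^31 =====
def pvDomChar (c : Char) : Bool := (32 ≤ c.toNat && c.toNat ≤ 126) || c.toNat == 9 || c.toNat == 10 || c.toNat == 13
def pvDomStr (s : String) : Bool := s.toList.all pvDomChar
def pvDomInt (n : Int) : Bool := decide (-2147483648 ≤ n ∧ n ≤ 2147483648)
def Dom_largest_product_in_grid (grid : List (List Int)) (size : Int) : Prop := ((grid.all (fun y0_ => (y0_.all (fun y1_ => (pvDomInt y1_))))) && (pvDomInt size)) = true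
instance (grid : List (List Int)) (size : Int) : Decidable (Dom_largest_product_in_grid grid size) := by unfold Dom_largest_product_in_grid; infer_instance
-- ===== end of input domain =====

-- B recasts the problem as line extraction: it materialises every row, column, diagonal and
-- anti-diagonal of the square as a 1-D list and takes the best 4-window product over each
-- line by a sliding scan, instead of A's per-cell scan with four guarded direction branches
-- (objective: alternative, same asymptotic cost).

-- grid[i][j]; exact under Pre_ below (Python raises IndexError out of range, excluded by Pre_).
def pvGridAt (grid : List (List Int)) (i j : Int) : Int :=
  PySem.List.pyGetD (PySem.List.pyGetD grid i []) j 0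

-- ===== PORT A =====
def largest_product_in_grid (grid : List (List Int)) (size : Int) : Int :=
  (PySem.List.pyRange 0 size 1).foldl (fun m i =>
    (PySem.List.pyRange 0 size 1).foldl (fun m j =>
      let m :=
        if i < size - 3 then
          let p := pvGridAt grid i j * pvGridAt grid (i+1) j * pvGridAt grid (i+2) j * pvGridAt grid (i+3) j
          if p > m then p else m
        else m
      if j < size - 3 then
        let p := pvGridAt grid i j * pvGridAt grid i (j+1) * pvGridAt grid i (j+2) * pvGridAt grid i (j+3)
        let m := if p > m then p else m
        let m :=
          if i < size - 3 then
            let p := pvGridAt grid i j * pvGridAt grid (i+1) (j+1) * pvGridAt grid (i+2) (j+2) * pvGridAt grid (i+3) (j+3)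
            if p > m then p else m
          else m
        if i ≥ 3 then
          let p := pvGridAt grid i j * pvGridAt grid (i-1) (j+1) * pvGridAt grid (i-2) (j+2) * pvGridAt grid (i-3) (j+3)
          if p > m then p else m
        else m
      else m) m) 0

-- ===== PORT B =====
-- line[t]; exact here: every access B makes is in range.
def pvLineAt (line : List Int) (t : Int) : Int := PySem.List.pyGetD line t 0

def pvRowLine (grid : List (List Int)) (size i : Int) : List Int :=
  (PySem.List.pyRange 0 size 1).map (fun j => pvGridAt grid i j)

def pvColLine (grid : List (List Int)) (size j : Int) : List Int :=
  (PySem.List.pyRange 0 size 1).map (fun i => pvGridAt grid i j)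

def pvDiagLine (grid : List (List Int)) (size s : Int) : List Int :=
  let d := s - (size - 1)
  (PySem.List.pyRange (max 0 d) (min size (size + d)) 1).map (fun i => pvGridAt grid i (i - d))

def pvAntiLine (grid : List (List Int)) (size s : Int) : List Int :=
  (PySem.List.pyRange (max 0 (s - size + 1)) (min size (s + 1)) 1).map (fun i => pvGridAt grid i (s - i))

def pvLines (grid : List (List Int)) (size : Int) : List (List Int) :=
  (PySem.List.pyRange 0 size 1).map (pvRowLine grid size) ++
  (PySem.List.pyRange 0 size 1).map (pvColLine grid size) ++
  (PySem.List.pyRange 0 (2 * size - 1) 1).map (pvDiagLine grid size) ++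
  (PySem.List.pyRange 0 (2 * size - 1) 1).map (pvAntiLine grid size)

def largest_product_in_grid_alt (grid : List (List Int)) (size : Int) : Int :=
  if size < 4 then 0
  else
    (pvLines grid size).foldl (fun best line =>
      (PySem.List.pyRange 0 ((line.length : Int) - 3) 1).foldl (fun best t =>
        let p := pvLineAt line t * pvLineAt line (t+1) * pvLineAt line (t+2) * pvLineAt line (t+3)
        if p > best then p else best) best) 0

-- ===== PRECONDITION & SPEC =====
-- Pre_ excludes exactly the inputs on which Python A raises IndexError: when size > 3 the
-- loop reads every cell (r, c) with 0 ≤ r, c < size, so it needs at least size rows each of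
-- length at least size; when size ≤ 3 no cell is ever read and A returns 0.
def Pre_largest_product_in_grid (grid : List (List Int)) (size : Int) : Prop :=
  size ≤ 3 ∨ (size ≤ (grid.length : Int) ∧ ∀ row ∈ grid.take size.toNat, size ≤ (row.length : Int))
instance (grid : List (List Int)) (size : Int) : Decidable (Pre_largest_product_in_grid grid size) := by
  unfold Pre_largest_product_in_grid; infer_instance

def pvWitness_largest_product_in_grid : List (List Int) × Int :=
  ([[1, 2, 3, 4], [5, 6, 7, 8], [9, 10, 11, 12], [13, 14, 15, 16]], 4)

def Spec_largest_product_in_grid (grid : List (List Int)) (size : Int) (out : Int) : Prop := out = largest_product_in_grid_alt grid size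
instance (grid : List (List Int)) (size : Int) (out : Int) : Decidable (Spec_largest_product_in_grid grid size out) := by unfold Spec_largest_product_in_grid; infer_instance

-- ===== CLAIM =====
def Claim_equal_largest_product_in_grid : Prop := ∀ (grid : List (List Int)) (size : Int), Dom_largest_product_in_grid grid size → Pre_largest_product_in_grid grid size → Spec_largest_product_in_grid grid size (largest_product_in_grid grid size)

-- ===== LEMMAS AND PROOFS =====

-- The four window products, written exactly as A multiplies them.
def Pv (g : List (List Int)) (i j : Int) : Int :=
  pvGridAt g i j * pvGridAt g (i+1) j * pvGridAt g (i+2) j * pvGridAt g (i+3) j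
def Ph (g : List (List Int)) (i j : Int) : Int :=
  pvGridAt g i j * pvGridAt g i (j+1) * pvGridAt g i (j+2) * pvGridAt g i (j+3)
def Pd (g : List (List Int)) (i j : Int) : Int :=
  pvGridAt g i j * pvGridAt g (i+1) (j+1) * pvGridAt g (i+2) (j+2) * pvGridAt g (i+3) (j+3)
def Pa (g : List (List Int)) (i j : Int) : Int :=
  pvGridAt g i j * pvGridAt g (i-1) (j+1) * pvGridAt g (i-2) (j+2) * pvGridAt g (i-3) (j+3)

-- The products A's body considers at cell (i, j), in A's order.
def cellA (g : List (List Int)) (size i j : Int) : List Int :=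
  (if i < size - 3 then [Pv g i j] else []) ++
  (if j < size - 3 then
     [Ph g i j] ++ (if i < size - 3 then [Pd g i j] else []) ++ (if i ≥ 3 then [Pa g i j] else [])
   else [])

def LA (g : List (List Int)) (size : Int) : List Int :=
  (PySem.List.pyRange 0 size 1).flatMap (fun i => (PySem.List.pyRange 0 size 1).flatMap (cellA g size i))

-- The 4-window product of a line at offset t, as B multiplies it.
def W (line : List Int) (t : Int) : Int :=
  pvLineAt line t * pvLineAt line (t+1) * pvLineAt line (t+2) * pvLineAt line (t+3)

-- The products B's sliding scan considers on one line.
def winProds (line : List Int) : List Int :=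
  (PySem.List.pyRange 0 ((line.length : Int) - 3) 1).map (fun t => W line t)

def LB (g : List (List Int)) (size : Int) : List Int :=
  (pvLines g size).flatMap winProds

theorem upd_eq_max (m x : Int) : (if x > m then x else m) = max m x := by omega

theorem A_eq (g : List (List Int)) (size : Int) :
    largest_product_in_grid g size = (LA g size).foldl max 0 := by
  unfold largest_product_in_grid LA
  rw [List.foldl_flatMap]
  apply List.foldl_ext
  intro m i _
  rw [List.foldl_flatMap]
  apply List.foldl_ext
  intro m j _
  unfold cellA Pv Ph Pd Pa
  by_cases hA : i < size - 3 <;> by_cases hB : j < size - 3 <;> by_cases hC : i ≥ 3 <;>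
    simp only [hA, hB, hC, ite_true, ite_false, upd_eq_max,
      List.cons_append, List.nil_append, List.append_nil,
      List.foldl_cons, List.foldl_nil]

theorem B_eq (g : List (List Int)) (size : Int) (h4 : ¬ size < 4) :
    largest_product_in_grid_alt g size = (LB g size).foldl max 0 := by
  unfold largest_product_in_grid_alt LB
  rw [if_neg h4, List.foldl_flatMap]
  apply List.foldl_ext
  intro m line _
  unfold winProds
  rw [List.foldl_map]
  apply List.foldl_ext
  intro m t _
  exact upd_eq_max m (W line t)

theorem foldl_max_congr (l₁ l₂ : List Int) (a : Int)
    (h₁ : ∀ x ∈ l₁, x ∈ l₂) (h₂ : ∀ x ∈ l₂, x ∈ l₁) :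
    l₁.foldl max a = l₂.foldl max a := by
  apply le_antisymm
  · rcases PySem.List.foldl_max_mem l₁ a with h | h
    · rw [h]; exact (PySem.List.le_foldl_max l₂ a).1
    · exact (PySem.List.le_foldl_max l₂ a).2 _ (h₁ _ h)
  · rcases PySem.List.foldl_max_mem l₂ a with h | h
    · rw [h]; exact (PySem.List.le_foldl_max l₁ a).1
    · exact (PySem.List.le_foldl_max l₁ a).2 _ (h₂ _ h)

-- indexing a comprehension over a range
theorem lineAt_map (f : Int → Int) (a b t : Int) (h0 : 0 ≤ t) (h1 : t < b - a) :
    pvLineAt ((PySem.List.pyRange a b 1).map f) t = f (a + t) := by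
  obtain ⟨k, rfl⟩ := Int.eq_ofNat_of_zero_le h0
  exact PySem.List.pyGetD_map_pyRange_one f a b k 0 (by omega)

theorem len_map_range (f : Int → Int) (a b : Int) :
    ((((PySem.List.pyRange a b 1).map f).length : Int)) = max (b - a) 0 := by
  simp [PySem.List.length_pyRange_one]

theorem LA_nil (g : List (List Int)) (size : Int) (h4 : size < 4) : LA g size = [] := by
  unfold LA
  rw [List.flatMap_eq_nil_iff]
  intro i hi
  rw [List.flatMap_eq_nil_iff]
  intro j hj
  have hi' := (PySem.List.mem_pyRange_one).1 hi
  have hj' := (PySem.List.mem_pyRange_one).1 hj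
  unfold cellA
  rw [if_neg (by omega), if_neg (by omega)]
  rfl

-- membership characterisations
theorem mem_winProds (line : List Int) (x : Int) :
    x ∈ winProds line ↔ ∃ t, (0 ≤ t ∧ t < (line.length : Int) - 3) ∧ x = W line t := by
  unfold winProds
  simp [List.mem_map, PySem.List.mem_pyRange_one, eq_comm]

theorem mem_LA_iff (g : List (List Int)) (size x : Int) :
    x ∈ LA g size ↔ ∃ i, (0 ≤ i ∧ i < size) ∧ ∃ j, (0 ≤ j ∧ j < size) ∧ x ∈ cellA g size i j := by
  unfold LA
  simp [List.mem_flatMap, PySem.List.mem_pyRange_one]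

theorem mem_LB_iff (g : List (List Int)) (size x : Int) :
    x ∈ LB g size ↔ ∃ line ∈ pvLines g size, x ∈ winProds line := by
  unfold LB
  simp [List.mem_flatMap]

theorem mem_cellA_elim (g : List (List Int)) (size i j x : Int) (hx : x ∈ cellA g size i j) :
    (i < size - 3 ∧ x = Pv g i j) ∨ (j < size - 3 ∧ x = Ph g i j) ∨
    (i < size - 3 ∧ j < size - 3 ∧ x = Pd g i j) ∨ (3 ≤ i ∧ j < size - 3 ∧ x = Pa g i j) := by
  unfold cellA at hx
  split_ifs at hx <;> simp at hx <;> tauto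

theorem mem_cellA_intro (g : List (List Int)) (size i j x : Int)
    (h : (i < size - 3 ∧ x = Pv g i j) ∨ (j < size - 3 ∧ x = Ph g i j) ∨
         (i < size - 3 ∧ j < size - 3 ∧ x = Pd g i j) ∨ (3 ≤ i ∧ j < size - 3 ∧ x = Pa g i j)) :
    x ∈ cellA g size i j := by
  unfold cellA
  rcases h with ⟨h1, rfl⟩ | ⟨h1, rfl⟩ | ⟨h1, h2, rfl⟩ | ⟨h1, h2, rfl⟩ <;>
    split_ifs <;> simp_all

-- lengths of the four line families
theorem len_rowLine (g : List (List Int)) (size i : Int) :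
    ((pvRowLine g size i).length : Int) = max (size - 0) 0 := by
  unfold pvRowLine; exact len_map_range _ 0 size

theorem len_colLine (g : List (List Int)) (size j : Int) :
    ((pvColLine g size j).length : Int) = max (size - 0) 0 := by
  unfold pvColLine; exact len_map_range _ 0 size

theorem len_diagLine (g : List (List Int)) (size s : Int) :
    ((pvDiagLine g size s).length : Int) =
      max (min size (size + (s - (size - 1))) - max 0 (s - (size - 1))) 0 := by
  unfold pvDiagLine; exact len_map_range _ _ _

theorem len_antiLine (g : List (List Int)) (size s : Int) :
    ((pvAntiLine g size s).length : Int) =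
      max (min size (s + 1) - max 0 (s - size + 1)) 0 := by
  unfold pvAntiLine; exact len_map_range _ _ _

-- window values of the four line families
theorem rowW (g : List (List Int)) (size i t : Int) (h0 : 0 ≤ t) (h1 : t + 3 < size) :
    W (pvRowLine g size i) t = Ph g i t := by
  unfold W pvRowLine Ph
  rw [lineAt_map _ 0 size t h0 (by omega), lineAt_map _ 0 size (t+1) (by omega) (by omega),
      lineAt_map _ 0 size (t+2) (by omega) (by omega), lineAt_map _ 0 size (t+3) (by omega) (by omega)]
  ring_nf

theorem colW (g : List (List Int)) (size j t : Int) (h0 : 0 ≤ t) (h1 : t + 3 < size) :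
    W (pvColLine g size j) t = Pv g t j := by
  unfold W pvColLine Pv
  rw [lineAt_map _ 0 size t h0 (by omega), lineAt_map _ 0 size (t+1) (by omega) (by omega),
      lineAt_map _ 0 size (t+2) (by omega) (by omega), lineAt_map _ 0 size (t+3) (by omega) (by omega)]
  ring_nf

theorem diagW (g : List (List Int)) (size s t : Int) (h0 : 0 ≤ t)
    (h1 : t + 3 < min size (size + (s - (size - 1))) - max 0 (s - (size - 1))) :
    W (pvDiagLine g size s) t =
      Pd g (max 0 (s - (size - 1)) + t) (max 0 (s - (size - 1)) + t - (s - (size - 1))) := by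
  unfold W pvDiagLine Pd
  simp only []
  rw [lineAt_map _ _ _ t h0 (by omega), lineAt_map _ _ _ (t+1) (by omega) (by omega),
      lineAt_map _ _ _ (t+2) (by omega) (by omega), lineAt_map _ _ _ (t+3) (by omega) (by omega)]
  ring_nf

theorem antiW (g : List (List Int)) (size s t : Int) (h0 : 0 ≤ t)
    (h1 : t + 3 < min size (s + 1) - max 0 (s - size + 1)) :
    W (pvAntiLine g size s) t =
      Pa g (max 0 (s - size + 1) + t + 3) (s - (max 0 (s - size + 1) + t + 3)) := by
  unfold W pvAntiLine Pa
  rw [lineAt_map _ _ _ t h0 (by omega), lineAt_map _ _ _ (t+1) (by omega) (by omega),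
      lineAt_map _ _ _ (t+2) (by omega) (by omega), lineAt_map _ _ _ (t+3) (by omega) (by omega)]
  ring_nf

-- pvLines membership, the four families
theorem mem_lines_row (g : List (List Int)) (size i : Int) (h : 0 ≤ i ∧ i < size) :
    pvRowLine g size i ∈ pvLines g size := by
  unfold pvLines
  simp only [List.mem_append, List.mem_map]
  exact Or.inl (Or.inl (Or.inl ⟨i, (PySem.List.mem_pyRange_one).2 h, rfl⟩))

theorem mem_lines_col (g : List (List Int)) (size j : Int) (h : 0 ≤ j ∧ j < size) :
    pvColLine g size j ∈ pvLines g size := by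
  unfold pvLines
  simp only [List.mem_append, List.mem_map]
  exact Or.inl (Or.inl (Or.inr ⟨j, (PySem.List.mem_pyRange_one).2 h, rfl⟩))

theorem mem_lines_diag (g : List (List Int)) (size s : Int) (h : 0 ≤ s ∧ s < 2 * size - 1) :
    pvDiagLine g size s ∈ pvLines g size := by
  unfold pvLines
  simp only [List.mem_append, List.mem_map]
  exact Or.inl (Or.inr ⟨s, (PySem.List.mem_pyRange_one).2 h, rfl⟩)

theorem mem_lines_anti (g : List (List Int)) (size s : Int) (h : 0 ≤ s ∧ s < 2 * size - 1) :
    pvAntiLine g size s ∈ pvLines g size := by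
  unfold pvLines
  simp only [List.mem_append, List.mem_map]
  exact Or.inr ⟨s, (PySem.List.mem_pyRange_one).2 h, rfl⟩

theorem mem_LB_of_mem_LA (g : List (List Int)) (size : Int) (h4 : 4 ≤ size)
    (x : Int) (hx : x ∈ LA g size) : x ∈ LB g size := by
  rw [mem_LA_iff] at hx
  obtain ⟨i, ⟨hi0, hiS⟩, j, ⟨hj0, hjS⟩, hc⟩ := hx
  rw [mem_LB_iff]
  rcases mem_cellA_elim g size i j x hc with ⟨h1, rfl⟩ | ⟨h1, rfl⟩ | ⟨h1, h2, rfl⟩ | ⟨h1, h2, rfl⟩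
  · -- vertical: column j, offset i
    refine ⟨pvColLine g size j, mem_lines_col g size j ⟨hj0, hjS⟩, ?_⟩
    rw [mem_winProds]
    exact ⟨i, ⟨hi0, by rw [len_colLine]; omega⟩, (colW g size j i hi0 (by omega)).symm⟩
  · -- horizontal: row i, offset j
    refine ⟨pvRowLine g size i, mem_lines_row g size i ⟨hi0, hiS⟩, ?_⟩
    rw [mem_winProds]
    exact ⟨j, ⟨hj0, by rw [len_rowLine]; omega⟩, (rowW g size i j hj0 (by omega)).symm⟩
  · -- diagonal: line s = (i - j) + (size - 1), offset i - max 0 (i - j)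
    refine ⟨pvDiagLine g size ((i - j) + (size - 1)),
      mem_lines_diag g size _ ⟨by omega, by omega⟩, ?_⟩
    rw [mem_winProds]
    have hd : (i - j) + (size - 1) - (size - 1) = i - j := by omega
    refine ⟨i - max 0 (i - j), ⟨by omega, ?_⟩, ?_⟩
    · rw [len_diagLine, hd]; omega
    · rw [diagW g size _ _ (by omega) (by rw [hd]; omega), hd]
      congr 1 <;> omega
  · -- anti-diagonal: line s = i + j, offset i - 3 - max 0 (i + j - size + 1)
    refine ⟨pvAntiLine g size (i + j), mem_lines_anti g size _ ⟨by omega, by omega⟩, ?_⟩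
    rw [mem_winProds]
    refine ⟨i - 3 - max 0 (i + j - size + 1), ⟨by omega, ?_⟩, ?_⟩
    · rw [len_antiLine]; omega
    · rw [antiW g size _ _ (by omega) (by omega)]
      congr 1 <;> omega

theorem mem_LA_of_mem_LB (g : List (List Int)) (size : Int) (h4 : 4 ≤ size)
    (x : Int) (hx : x ∈ LB g size) : x ∈ LA g size := by
  rw [mem_LB_iff] at hx
  obtain ⟨line, hline, hwin⟩ := hx
  unfold pvLines at hline
  simp only [List.mem_append, List.mem_map] at hline
  rw [mem_winProds] at hwin
  obtain ⟨t, ⟨ht0, htL⟩, rfl⟩ := hwin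
  rw [mem_LA_iff]
  rcases hline with ((⟨i, hi, rfl⟩ | ⟨j, hj, rfl⟩) | ⟨s, hs, rfl⟩) | ⟨s, hs, rfl⟩
  · -- row line i: horizontal window at (i, t)
    have hi' := (PySem.List.mem_pyRange_one).1 hi
    rw [len_rowLine] at htL
    refine ⟨i, ⟨hi'.1, hi'.2⟩, t, ⟨ht0, by omega⟩, ?_⟩
    rw [rowW g size i t ht0 (by omega)]
    exact mem_cellA_intro g size i t _ (Or.inr (Or.inl ⟨by omega, rfl⟩))
  · -- column line j: vertical window at (t, j)
    have hj' := (PySem.List.mem_pyRange_one).1 hj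
    rw [len_colLine] at htL
    refine ⟨t, ⟨ht0, by omega⟩, j, ⟨hj'.1, hj'.2⟩, ?_⟩
    rw [colW g size j t ht0 (by omega)]
    exact mem_cellA_intro g size t j _ (Or.inl ⟨by omega, rfl⟩)
  · -- diagonal line s: diagonal window
    have hs' := (PySem.List.mem_pyRange_one).1 hs
    rw [len_diagLine] at htL
    rw [diagW g size s t ht0 (by omega)]
    refine ⟨max 0 (s - (size - 1)) + t, ⟨by omega, by omega⟩,
            max 0 (s - (size - 1)) + t - (s - (size - 1)), ⟨by omega, by omega⟩, ?_⟩
    exact mem_cellA_intro g size _ _ _ (Or.inr (Or.inr (Or.inl ⟨by omega, by omega, rfl⟩)))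
  · -- anti-diagonal line s: anti window
    have hs' := (PySem.List.mem_pyRange_one).1 hs
    rw [len_antiLine] at htL
    rw [antiW g size s t ht0 (by omega)]
    refine ⟨max 0 (s - size + 1) + t + 3, ⟨by omega, by omega⟩,
            s - (max 0 (s - size + 1) + t + 3), ⟨by omega, by omega⟩, ?_⟩
    exact mem_cellA_intro g size _ _ _ (Or.inr (Or.inr (Or.inr ⟨by omega, by omega, rfl⟩)))

-- ===== VERDICT =====
theorem largest_product_in_grid_spec : Claim_equal_largest_product_in_grid := by
  intro grid size _ _
  unfold Spec_largest_product_in_grid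
  by_cases h4 : size < 4
  · rw [A_eq, LA_nil grid size h4]
    unfold largest_product_in_grid_alt
    rw [if_pos h4]
    rfl
  · rw [A_eq, B_eq grid size h4]
    exact foldl_max_congr _ _ _ (mem_LB_of_mem_LA grid size (by omega))
      (mem_LA_of_mem_LB grid size (by omega))
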